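-- pv_equiv track=rewrite | github.com/NewRookie1/Querify_0.2.4 | backend/src/utils/mode_formatter.py | add_visual_dividers
-- ===== SOURCE A (Python) =====
-- def add_visual_dividers(text: str) -> str:
--     """Adds a subtle HTML divider before Level 2 headers"""
--     divider = '<div style="width: 100%; height: 1px; background: var(--border-color-primary); margin: 20px 0;"></div>'
--
--     # Insert divider before headers, but not at the very start
--     lines = text.split('\n')
--     output = []
--     for i, line in enumerate(lines):
--         if line.startswith('## ') and i > 0:
--             output.append(divider)
--         output.append(line)
--
--     return '\n'.join(output)
-- ===== SOURCE B (Python) =====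
-- def add_visual_dividers(text: str) -> str:
--     """Adds a subtle HTML divider before Level 2 headers"""
--     divider = '<div style="width: 100%; height: 1px; background: var(--border-color-primary); margin: 20px 0;"></div>'
--     # A "## " header line anywhere but at the very start is exactly an
--     # occurrence of the substring '\n## '; insert the divider line there.
--     return text.replace('\n## ', '\n' + divider + '\n## ')
-- ===== Notes on version B (the rewrite author's own statement) =====
-- stated objective: idiomatic
-- what changed: Replaces the split-into-lines / indexed loop / join pipeline with a single str.replace that rewrites each newline-followed level-2 header marker into newline, divider line, then the marker again.
import Mathlib
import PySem

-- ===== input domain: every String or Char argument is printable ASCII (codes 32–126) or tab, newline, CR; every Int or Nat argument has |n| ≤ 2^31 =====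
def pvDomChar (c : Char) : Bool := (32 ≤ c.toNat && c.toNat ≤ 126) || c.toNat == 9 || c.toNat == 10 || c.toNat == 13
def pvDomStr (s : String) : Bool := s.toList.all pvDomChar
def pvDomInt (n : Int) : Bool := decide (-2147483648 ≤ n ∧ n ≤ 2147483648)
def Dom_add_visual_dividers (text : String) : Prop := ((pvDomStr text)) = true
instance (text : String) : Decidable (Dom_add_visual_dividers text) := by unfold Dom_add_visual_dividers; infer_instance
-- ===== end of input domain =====

-- B replaces A's split-into-lines / indexed-loop / join pipeline with a single
-- str.replace of "\n## " (a level-2 header line start anywhere but at the very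
-- start of the text) by "\n" + divider + "\n## " — same value, more idiomatic.

-- the divider line both Pythons build (a string literal)
def pvDivider : String := "<div style=\"width: 100%; height: 1px; background: var(--border-color-primary); margin: 20px 0;\"></div>"

-- ===== PORT A =====
def add_visual_dividers (text : String) : String :=
  let divider := pvDivider
  let lines := (PySem.Str.split? text "\n").getD []
  let output := (PySem.List.enumerate lines).foldl
    (fun output p =>
      (if PySem.Str.startswith p.2 "## " && decide (p.1 > 0) then output ++ [divider] else output) ++ [p.2])
    []
  PySem.Str.join "\n" output

-- ===== PORT B =====
def add_visual_dividers_alt (text : String) : String :=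
  let divider := pvDivider
  PySem.Str.replace text "\n## " ("\n" ++ divider ++ "\n## ")

-- ===== PRECONDITION & SPEC =====
def Spec_add_visual_dividers (text : String) (out : String) : Prop := out = add_visual_dividers_alt text
instance (text : String) (out : String) : Decidable (Spec_add_visual_dividers text out) := by unfold Spec_add_visual_dividers; infer_instance

-- ===== CLAIM (what is proved, stated in full; the proofs are below) =====
def Claim_equal_add_visual_dividers : Prop := ∀ (text : String), Dom_add_visual_dividers text → Spec_add_visual_dividers text (add_visual_dividers text)

-- ===== LEMMAS AND PROOFS =====

def pvOld : List Char := ['\n', '#', '#', ' ']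
def pvHdr : List Char := ['#', '#', ' ']
def pvRepF (d : List Char) : List Char → List Char
  | [] => []
  | c :: t =>
      if pvOld.isPrefixOf (c :: t) then ('\n' :: (d ++ pvOld)) ++ pvRepF d (t.drop 3)
      else c :: pvRepF d t
termination_by l => l.length
decreasing_by all_goals simp
def pvSplitF : List Char → List Char → List (List Char)
  | pre, [] => [pre]
  | pre, c :: t => if c = '\n' then pre :: pvSplitF [] t else pvSplitF (pre ++ [c]) t
def pvItem (d l : List Char) : List Char := if pvHdr.isPrefixOf l then d ++ '\n' :: l else l
def pvItemJoin (d : List Char) : List (List Char) → List Char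
  | [] => []
  | l :: L => pvItem d l ++ L.flatMap (fun x => '\n' :: pvItem d x)
def pvFlatJoin (d : List Char) : List (List Char) → List Char
  | [] => []
  | l :: L => l ++ L.flatMap (fun x => '\n' :: pvItem d x)

lemma pvSplitF_cons : ∀ (t pre : List Char), ∃ a M, pvSplitF pre t = a :: M := by
  intro t
  induction t with
  | nil => intro pre; exact ⟨pre, [], rfl⟩
  | cons c t ih =>
    intro pre
    by_cases hc : c = '\n'
    · exact ⟨pre, pvSplitF [] t, by simp [pvSplitF, hc]⟩
    · obtain ⟨a, M, h⟩ := ih (pre ++ [c])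
      exact ⟨a, M, by simp [pvSplitF, hc, h]⟩

lemma pvHdr_prefix_newline (pre t : List Char) :
    pvHdr.isPrefixOf (pre ++ '\n' :: t) = pvHdr.isPrefixOf pre := by
  rcases pre with _ | ⟨a, _ | ⟨b, _ | ⟨c, r⟩⟩⟩ <;> simp [pvHdr, List.isPrefixOf]

lemma pvRepF_hdr (d u : List Char) : pvRepF d ('#' :: '#' :: ' ' :: u) = '#' :: '#' :: ' ' :: pvRepF d u := by
  rw [pvRepF, pvRepF, pvRepF]
  simp [pvOld, List.isPrefixOf]

lemma pvRepF_newline (d t : List Char) :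
    pvRepF d ('\n' :: t) = '\n' :: (if pvHdr.isPrefixOf t then d ++ '\n' :: pvRepF d t else pvRepF d t) := by
  rw [pvRepF]
  have hcond : pvOld.isPrefixOf ('\n' :: t) = pvHdr.isPrefixOf t := by
    simp [pvOld, pvHdr]
  rw [hcond]
  by_cases h : pvHdr.isPrefixOf t
  · rw [if_pos h, if_pos h]
    rw [List.isPrefixOf_iff_prefix] at h
    obtain ⟨u, rfl⟩ := h
    show ('\n' :: (d ++ pvOld)) ++ pvRepF d ((pvHdr ++ u).drop 3) = _
    rw [show pvHdr ++ u = '#' :: '#' :: ' ' :: u from rfl]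
    rw [pvRepF_hdr]
    simp [pvOld]
  · rw [if_neg h, if_neg h]

lemma pvRepF_cons_ne (d : List Char) {c : Char} (t : List Char) (hc : ¬ c = '\n') :
    pvRepF d (c :: t) = c :: pvRepF d t := by
  rw [pvRepF, if_neg]
  simp [pvOld, List.isPrefixOf]
  exact fun h' => (hc h'.symm).elim


lemma pvReplaceGo (d : List Char) : ∀ (fuel : Nat) (l acc : List Char), l.length ≤ fuel →
    PySem.Chars.replace.go pvOld ('\n' :: (d ++ pvOld)) fuel l acc = acc.reverse ++ pvRepF d l := by
  intro fuel
  induction fuel with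
  | zero =>
    intro l acc h
    have hl : l = [] := by cases l <;> simp_all
    subst hl
    simp [PySem.Chars.replace.go, pvRepF]
  | succ n ih =>
    intro l acc h
    cases l with
    | nil => simp [PySem.Chars.replace.go, pvRepF]
    | cons c t =>
      rw [PySem.Chars.replace.go]
      by_cases hp : pvOld.isPrefixOf (c :: t)
      · rw [if_pos hp]
        have hlen : ((c :: t).drop pvOld.length).length ≤ n := by
          simp [pvOld] at h ⊢; omega
        rw [ih _ _ hlen]
        rw [pvRepF, if_pos hp]
        simp [pvOld]
      · rw [if_neg hp]
        have hlen : t.length ≤ n := by simp at h; omega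
        rw [ih _ _ hlen]
        rw [pvRepF, if_neg hp]
        simp

lemma pvSplitOnGo : ∀ (fuel : Nat) (l cur : List Char) (acc : List (List Char)), l.length ≤ fuel →
    PySem.Chars.splitOn.go ['\n'] fuel l cur acc = acc.reverse ++ pvSplitF cur.reverse l := by
  intro fuel
  induction fuel with
  | zero =>
    intro l cur acc h
    have hl : l = [] := by cases l <;> simp_all
    subst hl
    simp [PySem.Chars.splitOn.go, pvSplitF]
  | succ n ih =>
    intro l cur acc h
    cases l with
    | nil => simp [PySem.Chars.splitOn.go, pvSplitF]
    | cons c t =>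
      rw [PySem.Chars.splitOn.go]
      by_cases hc : c = '\n'
      · have hp : List.isPrefixOf ['\n'] (c :: t) = true := by simp [List.isPrefixOf, hc]
        rw [if_pos hp]
        have hlen : ((c :: t).drop (List.length ['\n'])).length ≤ n := by simp at h ⊢; omega
        rw [ih _ _ _ hlen]
        simp [pvSplitF, hc]
      · have hp : ¬ (List.isPrefixOf ['\n'] (c :: t) = true) := by
          simp [List.isPrefixOf]
          exact fun h' => (hc h'.symm).elim
        rw [if_neg hp]
        have hlen : t.length ≤ n := by simp at h; omega
        rw [ih _ _ _ hlen]
        simp [pvSplitF, hc]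

lemma pvItemJoin_eq (d : List Char) : ∀ (t pre : List Char),
    pvItemJoin d (pvSplitF pre t) =
      (if pvHdr.isPrefixOf (pre ++ t) then d ++ '\n' :: (pre ++ pvRepF d t) else pre ++ pvRepF d t) := by
  intro t
  induction t with
  | nil =>
    intro pre
    simp [pvSplitF, pvItemJoin, pvItem, pvRepF]
  | cons c t ih =>
    intro pre
    by_cases hc : c = '\n'
    · subst hc
      rw [show pvSplitF pre ('\n' :: t) = pre :: pvSplitF [] t by rw [pvSplitF]; simp]
      obtain ⟨a, M, hS⟩ := pvSplitF_cons t []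
      have hflat : pvItemJoin d (pre :: pvSplitF [] t)
          = pvItem d pre ++ '\n' :: pvItemJoin d (pvSplitF [] t) := by
        rw [hS]; simp [pvItemJoin]
      rw [hflat, ih []]
      rw [pvHdr_prefix_newline, pvRepF_newline]
      simp only [List.nil_append]
      by_cases h1 : pvHdr.isPrefixOf pre <;> by_cases h2 : pvHdr.isPrefixOf t <;>
        simp [pvItem, h1, h2]
    · rw [show pvSplitF pre (c :: t) = pvSplitF (pre ++ [c]) t by rw [pvSplitF]; simp [hc]]
      rw [ih (pre ++ [c])]
      rw [pvRepF_cons_ne d t hc]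
      simp

lemma pvFlatJoin_eq (d : List Char) : ∀ (t pre : List Char),
    pvFlatJoin d (pvSplitF pre t) = pre ++ pvRepF d t := by
  intro t
  induction t with
  | nil =>
    intro pre
    simp [pvSplitF, pvFlatJoin, pvRepF]
  | cons c t ih =>
    intro pre
    by_cases hc : c = '\n'
    · subst hc
      rw [show pvSplitF pre ('\n' :: t) = pre :: pvSplitF [] t by rw [pvSplitF]; simp]
      obtain ⟨a, M, hS⟩ := pvSplitF_cons t []
      have hflat : pvFlatJoin d (pre :: pvSplitF [] t)
          = pre ++ '\n' :: pvItemJoin d (pvSplitF [] t) := by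
        rw [hS]; simp [pvFlatJoin, pvItemJoin]
      rw [hflat, pvItemJoin_eq d t [], pvRepF_newline]
      simp
    · rw [show pvSplitF pre (c :: t) = pvSplitF (pre ++ [c]) t by rw [pvSplitF]; simp [hc]]
      rw [ih (pre ++ [c])]
      rw [pvRepF_cons_ne d t hc]
      simp

lemma pvJoin_cons (l0 : List Char) (R : List (List Char)) :
    PySem.Chars.join ['\n'] (l0 :: R) = l0 ++ R.flatMap (fun x => '\n' :: x) := by
  induction R generalizing l0 with
  | nil => simp [PySem.Chars.join, List.intercalate]
  | cons r R ih =>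
    simp only [PySem.Chars.join, List.intercalate] at ih ⊢
    simp [List.intersperse_cons₂, ih]

lemma pvJoinHelper (d l0 : List Char) (M : List (List Char)) :
    PySem.Chars.join ['\n'] (l0 :: M.flatMap (fun x => if pvHdr.isPrefixOf x then [d, x] else [x]))
      = pvFlatJoin d (l0 :: M) := by
  rw [pvJoin_cons]
  show l0 ++ _ = _
  rw [show pvFlatJoin d (l0 :: M) = l0 ++ M.flatMap (fun x => '\n' :: pvItem d x) from rfl]
  congr 1
  rw [List.flatMap_assoc]
  apply List.flatMap_congr
  intro x _
  by_cases h : pvHdr.isPrefixOf x <;> simp [pvItem, h]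

lemma pvLoop (ls : List String) : ∀ (k : Int) (out : List String), 1 ≤ k →
    (PySem.List.enumerate ls k).foldl
      (fun output p =>
        (if PySem.Str.startswith p.2 "## " && decide (p.1 > 0) then output ++ [pvDivider] else output) ++ [p.2])
      out
    = out ++ ls.flatMap (fun l => if PySem.Str.startswith l "## " then [pvDivider, l] else [l]) := by
  induction ls with
  | nil => intro k out hk; simp [PySem.List.enumerate]
  | cons x ls ih =>
    intro k out hk
    rw [show PySem.List.enumerate (x :: ls) k = (k, x) :: PySem.List.enumerate ls (k + 1) from rfl]
    rw [List.foldl_cons]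
    rw [ih (k + 1) _ (by omega)]
    have hdec : decide (k > 0) = true := by simp; omega
    simp only [hdec, Bool.and_true]
    by_cases hsw : PySem.Str.startswith x "## " = true
    · rw [if_pos hsw]; simp at hsw; simp [hsw]
    · rw [if_neg hsw]; simp at hsw; simp [hsw]

theorem pvMain (text : String) : add_visual_dividers text = add_visual_dividers_alt text := by
  unfold add_visual_dividers add_visual_dividers_alt
  simp only []
  -- B side
  have hB : PySem.Str.replace text "\n## " ("\n" ++ pvDivider ++ "\n## ")
      = String.ofList (pvRepF pvDivider.toList text.toList) := by
    rw [show PySem.Str.replace text "\n## " ("\n" ++ pvDivider ++ "\n## ")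
        = String.ofList (PySem.Chars.replace text.toList ("\n## ").toList
            (("\n" ++ pvDivider ++ "\n## ")).toList) from rfl]
    congr 1
    rw [show ("\n## ").toList = pvOld from rfl]
    rw [show ("\n" ++ pvDivider ++ "\n## ").toList = '\n' :: (pvDivider.toList ++ pvOld) by
      simp [String.toList_append, pvOld]]
    rw [PySem.Chars.replace]
    rw [if_neg (by simp [pvOld])]
    exact pvReplaceGo pvDivider.toList text.toList.length text.toList [] (le_refl _)
  -- A side: the split
  have hSplit : (PySem.Str.split? text "\n").getD []
      = List.map String.ofList (pvSplitF [] text.toList) := by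
    rw [show PySem.Str.split? text "\n"
        = Option.map (List.map String.ofList) (PySem.Chars.split? text.toList ['\n']) from rfl]
    rw [PySem.Chars.split?]
    rw [if_neg (by simp)]
    rw [PySem.Chars.splitOn]
    rw [pvSplitOnGo (text.toList.length + 1) text.toList [] [] (by omega)]
    simp
  rw [hSplit, hB]
  obtain ⟨a, M, hS⟩ := pvSplitF_cons text.toList []
  rw [hS]
  rw [show List.map String.ofList (a :: M) = String.ofList a :: List.map String.ofList M from rfl]
  rw [show PySem.List.enumerate (String.ofList a :: List.map String.ofList M)
      = ((0 : Int), String.ofList a) :: PySem.List.enumerate (List.map String.ofList M) 1 from rfl]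
  rw [List.foldl_cons]
  rw [show ((if PySem.Str.startswith (String.ofList a) "## " && decide ((0:Int) > 0)
      then ([] : List String) ++ [pvDivider] else []) ++ [String.ofList a]) = [String.ofList a] by simp]
  rw [pvLoop (List.map String.ofList M) 1 [String.ofList a] (le_refl _)]
  rw [List.flatMap_map]
  -- now the join
  rw [show PySem.Str.join "\n"
        ([String.ofList a] ++ M.flatMap fun x => if PySem.Str.startswith (String.ofList x) "## " then [pvDivider, String.ofList x] else [String.ofList x])
      = String.ofList (PySem.Chars.join ['\n'] (List.map String.toList
          ([String.ofList a] ++ M.flatMap fun x => if PySem.Str.startswith (String.ofList x) "## " then [pvDivider, String.ofList x] else [String.ofList x]))) from rfl]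
  congr 1
  have hmap : List.map String.toList
      ([String.ofList a] ++ M.flatMap fun x => if PySem.Str.startswith (String.ofList x) "## " then [pvDivider, String.ofList x] else [String.ofList x])
      = a :: M.flatMap (fun x => if pvHdr.isPrefixOf x then [pvDivider.toList, x] else [x]) := by
    rw [List.map_append, List.map_flatMap]
    rw [show List.map String.toList [String.ofList a] = [a] by simp]
    rw [List.singleton_append]
    congr 1
    refine List.flatMap_congr ?_
    intro x _
    rw [show PySem.Str.startswith (String.ofList x) "## " = pvHdr.isPrefixOf x by
      rw [PySem.Str.startswith_eq, String.toList_ofList]; rfl]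
    by_cases h : pvHdr.isPrefixOf x <;> simp [h]
  rw [hmap, pvJoinHelper pvDivider.toList a M, ← hS, pvFlatJoin_eq]
  simp

-- ===== VERDICT (by name: the statement is the Claim_ definition above) =====
theorem add_visual_dividers_spec : Claim_equal_add_visual_dividers := by
  intro text _
  exact pvMain text
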